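-- pv_equiv track=rewrite | github.com/taggedzi/tzEnc2 | src/tzEnc2/grid.py | find_used_character_block_indexes
-- ===== SOURCE A (Python) =====
-- from typing import Any, Union, List, Set, Tuple, TypeVar
--
-- def find_used_character_block_indexes(
--     list_of_lists: List[List[str]],
--     message_char_set: Set[str]
-- ) -> List[int]:
--     """
--     Find the indexes of character blocks (sublists) that contain any characters
--     from the given message character set. For each matching block, remove the
--     matched characters from a copy of the set. Stops when all characters are matched
--     or the list is exhausted. The original set is not modified.
--
--     Args:
--         list_of_lists (List[List[str]]): A list of character blocks (each a list of characters).
--         message_char_set (Set[str]): A set of characters from the input message to be matched.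
--
--     Returns:
--         List[int]: A list of unique indexes of blocks that contributed characters to the message.
--     """
--     remaining_chars = set(message_char_set)  # make a local copy
--     result: List[int] = []
--
--     for idx, char_list in enumerate(list_of_lists):
--         if not remaining_chars:
--             break
--
--         if any(char in remaining_chars for char in char_list):
--             result.append(idx)
--             remaining_chars.difference_update(char_list)
--
--     return result
-- ===== SOURCE B (Python) =====
-- def find_used_character_block_indexes(list_of_lists, message_char_set):
--     """Two staged passes: first build a hash index mapping each character to the
--     index of the FIRST block containing it; then the answer is simply the sorted
--     set of first-block indexes of the message characters that occur at all.
--     Correct because A selects block i exactly when i is the first block containing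
--     some message character: such a character is still 'remaining' when block i is
--     reached (no earlier block holds it), and conversely a selected block must hold
--     a remaining character, whose first occurrence is that very block."""
--     first_block = {}
--     for idx, block in enumerate(list_of_lists):
--         for ch in block:
--             if ch not in first_block:
--                 first_block[ch] = idx
--     return sorted({first_block[c] for c in message_char_set if c in first_block})
-- ===== Notes on version B (the rewrite author's own statement) =====
-- stated objective: alternative
-- what changed: Replaces A's stateful greedy scan with a shrinking remaining-set by two staged passes: build a char->first-block-index hash index once, then return the sorted set of first-block indexes of the message characters; no per-block set subtraction remains.
import Mathlib
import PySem

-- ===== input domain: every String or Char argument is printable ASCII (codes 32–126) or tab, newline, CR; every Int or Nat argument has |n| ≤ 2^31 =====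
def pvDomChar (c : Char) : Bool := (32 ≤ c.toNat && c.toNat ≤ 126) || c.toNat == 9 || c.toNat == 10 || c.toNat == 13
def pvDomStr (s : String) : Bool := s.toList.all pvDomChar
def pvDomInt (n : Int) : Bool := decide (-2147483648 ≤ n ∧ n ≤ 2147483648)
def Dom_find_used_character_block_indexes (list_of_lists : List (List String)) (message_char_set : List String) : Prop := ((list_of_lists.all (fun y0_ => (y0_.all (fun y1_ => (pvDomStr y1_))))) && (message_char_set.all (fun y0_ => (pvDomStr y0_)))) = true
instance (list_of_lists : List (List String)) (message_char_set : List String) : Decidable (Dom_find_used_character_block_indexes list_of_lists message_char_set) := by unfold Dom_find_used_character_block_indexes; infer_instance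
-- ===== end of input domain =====

-- B replaces A's greedy scan with a shrinking remaining-set by two staged passes:
-- build a char -> first-block-index dictionary once, then return the sorted set of
-- the message characters' first-block indexes; objective: alternative algorithm.


-- ===== PORT A =====
-- the for-loop with its early `break`: structural recursion over the blocks,
-- carrying the running index, the remaining-characters set and the result list
def pvALoop : List (List String) → Int → PySem.Set String → List Int → List Int
  | [], _, _, res => res
  | char_list :: rest, idx, rem, res =>
    if rem = [] then res
    else if char_list.any (fun c => PySem.Set.contains rem c) then
      pvALoop rest (idx + 1) (PySem.Set.diff rem char_list) (res ++ [idx])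
    else
      pvALoop rest (idx + 1) rem res

def find_used_character_block_indexes (list_of_lists : List (List String)) (message_char_set : List String) : List Int :=
  pvALoop list_of_lists 0 (PySem.Set.ofList message_char_set) []

-- ===== PORT B =====
-- pass 1: `for idx, block in enumerate(...): for ch in block: if ch not in first_block: first_block[ch] = idx`
def pvFirstDict : List (List String) → Int → PySem.Dict String Int → PySem.Dict String Int
  | [], _, d => d
  | block :: rest, idx, d =>
    pvFirstDict rest (idx + 1)
      (block.foldl (fun d ch => if d.contains ch then d else d.insert ch idx) d)

-- pass 2: `sorted({first_block[c] for c in message_char_set if c in first_block})`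
def find_used_character_block_indexes_alt (list_of_lists : List (List String)) (message_char_set : List String) : List Int :=
  let fb := pvFirstDict list_of_lists 0 PySem.Dict.empty
  PySem.List.sorted
    (message_char_set.foldl (fun s c =>
      match fb.get? c with
      | some i => PySem.Set.add s i
      | none => s) PySem.Set.empty)
    (fun x => x)

-- ===== PRECONDITION & SPEC =====
def Spec_find_used_character_block_indexes (list_of_lists : List (List String)) (message_char_set : List String) (out : List Int) : Prop := out = find_used_character_block_indexes_alt list_of_lists message_char_set
instance (list_of_lists : List (List String)) (message_char_set : List String) (out : List Int) : Decidable (Spec_find_used_character_block_indexes list_of_lists message_char_set out) := by unfold Spec_find_used_character_block_indexes; infer_instance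

-- ===== CLAIM (what is proved, stated in full; the proofs are below) =====
def Claim_equal_find_used_character_block_indexes : Prop := ∀ (list_of_lists : List (List String)) (message_char_set : List String), Dom_find_used_character_block_indexes list_of_lists message_char_set → Spec_find_used_character_block_indexes list_of_lists message_char_set (find_used_character_block_indexes list_of_lists message_char_set)

-- ===== LEMMAS AND PROOFS =====

-- the mathematical yardstick both proofs are measured against:
-- the index of the first block (counting from idx) that contains c
def pvFirst? (c : String) : List (List String) → Int → Option Int
  | [], _ => none
  | bl :: rest, idx => if bl.contains c then some idx else pvFirst? c rest (idx + 1)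

-- membership in a set difference
lemma pvContainsDiff (s : PySem.Set String) (t : List String) (c : String) :
    List.contains (PySem.Set.diff s t) c = (List.contains s c && !(List.contains t c)) := by
  rw [Bool.eq_iff_iff]
  simp [PySem.Set.diff, List.contains_eq_mem, List.mem_filter]

-- A's loop, membership characterisation: i is collected iff it was already in res
-- or some remaining character first occurs (within rest) at block i
lemma pvAMem (rest : List (List String)) (idx : Int) (rem : PySem.Set String) (res : List Int) (i : Int) :
    i ∈ pvALoop rest idx rem res ↔
      i ∈ res ∨ ∃ c, List.contains rem c = true ∧ pvFirst? c rest idx = some i := by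
  induction rest generalizing idx rem res with
  | nil => simp [pvALoop, pvFirst?]
  | cons bl rest ih =>
    by_cases hrem : rem = []
    · subst hrem
      simp [pvALoop, pvFirst?]
    · simp only [pvALoop, if_neg hrem, PySem.Set.contains]
      by_cases hany : bl.any (fun c => List.contains rem c) = true
      · rw [if_pos hany, ih]
        constructor
        · rintro (h | ⟨c, hc, hf⟩)
          · rcases List.mem_append.mp h with h | h
            · exact Or.inl h
            · simp only [List.mem_singleton] at h
              subst h
              rcases List.any_eq_true.mp hany with ⟨c, hcbl, hcrem⟩
              have hbl : bl.contains c = true := by simpa [List.contains_eq_mem] using hcbl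
              exact Or.inr ⟨c, hcrem, by simp only [pvFirst?]; rw [if_pos hbl]⟩
          · rw [pvContainsDiff] at hc
            obtain ⟨h1, h2⟩ := Bool.and_eq_true_iff.mp hc
            refine Or.inr ⟨c, h1, ?_⟩
            have hbl : bl.contains c = false := by
              cases h : bl.contains c
              · rfl
              · rw [h] at h2; cases h2
            simp only [pvFirst?, hbl, Bool.false_eq_true, if_false]
            exact hf
        · rintro (h | ⟨c, hc, hf⟩)
          · exact Or.inl (List.mem_append.mpr (Or.inl h))
          · by_cases hbl : bl.contains c = true
            · simp only [pvFirst?] at hf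
              rw [if_pos hbl] at hf
              injection hf with hf
              subst hf
              exact Or.inl (List.mem_append.mpr (Or.inr (by simp)))
            · have hbl' : bl.contains c = false := Bool.eq_false_iff.mpr hbl
              simp only [pvFirst?, hbl', Bool.false_eq_true, if_false] at hf
              refine Or.inr ⟨c, ?_, hf⟩
              rw [pvContainsDiff, hc, hbl']
              rfl
      · rw [if_neg hany, ih]
        have hnobl : ∀ c, List.contains rem c = true → bl.contains c = false := by
          intro c hc
          cases h : bl.contains c
          · rfl
          · exact absurd (List.any_eq_true.mpr ⟨c, by simpa [List.contains_eq_mem] using h, hc⟩) hany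
        constructor
        · rintro (h | ⟨c, hc, hf⟩)
          · exact Or.inl h
          · exact Or.inr ⟨c, hc, by
              simp only [pvFirst?, hnobl c hc, Bool.false_eq_true, if_false]
              exact hf⟩
        · rintro (h | ⟨c, hc, hf⟩)
          · exact Or.inl h
          · simp only [pvFirst?, hnobl c hc, Bool.false_eq_true, if_false] at hf
            exact Or.inr ⟨c, hc, hf⟩

-- A's loop keeps the accumulated index list strictly increasing
lemma pvASorted (rest : List (List String)) (idx : Int) (rem : PySem.Set String) (res : List Int)
    (H2 : res.Pairwise (· < ·)) (H3 : ∀ x ∈ res, x < idx) :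
    (pvALoop rest idx rem res).Pairwise (· < ·) := by
  induction rest generalizing idx rem res with
  | nil => exact H2
  | cons bl rest ih =>
    by_cases hrem : rem = []
    · simpa [pvALoop, hrem] using H2
    · simp only [pvALoop, if_neg hrem]
      by_cases hany : bl.any (fun c => PySem.Set.contains rem c) = true
      · rw [if_pos hany]
        refine ih (idx + 1) _ _ ?_ ?_
        · rw [List.pairwise_append]
          exact ⟨H2, List.pairwise_singleton _ _, by simpa using H3⟩
        · intro x hx
          rcases List.mem_append.mp hx with h | h
          · exact lt_trans (H3 x h) (by omega)
          · simp at h; omega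
      · rw [if_neg hany]
        exact ih (idx + 1) rem res H2 (fun x hx => lt_trans (H3 x hx) (by omega))

-- B pass 1, inner loop: lookup after folding one block
lemma pvInnerGet (bl : List String) (idx : Int) (d : PySem.Dict String Int) (c : String) :
    (bl.foldl (fun d ch => if d.contains ch then d else d.insert ch idx) d).get? c =
      match d.get? c with
      | some v => some v
      | none => if bl.contains c then some idx else none := by
  induction bl generalizing d with
  | nil => cases h : d.get? c <;> simp [h]
  | cons ch rest ih =>
    rw [List.foldl_cons]
    by_cases hd : d.contains ch = true
    · rw [if_pos hd, ih]
      by_cases hcc : c = ch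
      · subst hcc
        have : ∃ v, d.get? c = some v := by
          cases h : d.get? c
          · rw [PySem.Dict.contains_eq_isSome_get?, h] at hd; cases hd
          · exact ⟨_, rfl⟩
        obtain ⟨v, hv⟩ := this
        simp [hv]
      · cases h : d.get? c <;> simp [hcc]
    · rw [if_neg hd, ih]
      have hdn : d.get? ch = none := by
        cases h : d.get? ch
        · rfl
        · rw [PySem.Dict.contains_eq_isSome_get?, h] at hd; simp at hd
      by_cases hcc : c = ch
      · subst hcc
        rw [PySem.Dict.get?_insert_self, hdn]
        simp
      · rw [PySem.Dict.get?_insert_of_ne _ _ hcc]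
        cases h : d.get? c <;> simp [hcc]

-- B pass 1: the dictionary maps c to the first block index containing c
lemma pvDictSpec (rest : List (List String)) (idx : Int) (d : PySem.Dict String Int) (c : String) :
    (pvFirstDict rest idx d).get? c =
      match d.get? c with
      | some v => some v
      | none => pvFirst? c rest idx := by
  induction rest generalizing idx d with
  | nil => cases h : d.get? c <;> simp [pvFirstDict, pvFirst?, h]
  | cons bl rest ih =>
    simp only [pvFirstDict]
    rw [ih, pvInnerGet]
    cases h : d.get? c
    · simp only [pvFirst?]
      by_cases hbl : c ∈ bl
      · simp [hbl]
      · simp [hbl]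
    · simp

-- B pass 2: membership in the accumulated result set
lemma pvBMem (fb : PySem.Dict String Int) (msg : List String) (s : PySem.Set Int) (i : Int) :
    i ∈ msg.foldl (fun s c =>
        match fb.get? c with
        | some j => PySem.Set.add s j
        | none => s) s ↔
      i ∈ s ∨ ∃ c ∈ msg, fb.get? c = some i := by
  induction msg generalizing s with
  | nil => simp
  | cons c rest ih =>
    rw [List.foldl_cons]
    cases h : fb.get? c with
    | none =>
      rw [ih]
      constructor
      · rintro (hs | ⟨c', hc', hf⟩)
        · exact Or.inl hs
        · exact Or.inr ⟨c', by simp [hc'], hf⟩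
      · rintro (hs | ⟨c', hc', hf⟩)
        · exact Or.inl hs
        · rcases List.mem_cons.mp hc' with rfl | hc'
          · rw [h] at hf; cases hf
          · exact Or.inr ⟨c', hc', hf⟩
    | some j =>
      rw [ih, PySem.Set.mem_add s j i]
      constructor
      · rintro ((hs | rfl) | ⟨c', hc', hf⟩)
        · exact Or.inl hs
        · exact Or.inr ⟨c, by simp, h⟩
        · exact Or.inr ⟨c', by simp [hc'], hf⟩
      · rintro (hs | ⟨c', hc', hf⟩)
        · exact Or.inl (Or.inl hs)
        · rcases List.mem_cons.mp hc' with rfl | hc'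
          · rw [h] at hf
            exact Or.inl (Or.inr (by injection hf; omega))
          · exact Or.inr ⟨c', hc', hf⟩

-- B pass 2: the accumulated result set has no duplicates
lemma pvBNodup (fb : PySem.Dict String Int) (msg : List String) (s : PySem.Set Int)
    (hs : s.Nodup) :
    (msg.foldl (fun s c =>
        match fb.get? c with
        | some j => PySem.Set.add s j
        | none => s) s).Nodup := by
  induction msg generalizing s with
  | nil => exact hs
  | cons c rest ih =>
    rw [List.foldl_cons]
    cases h : fb.get? c
    · exact ih s hs
    · exact ih _ (PySem.Set.nodup_add _ _ hs)

-- ===== VERDICT (by name: the statement is the Claim_ definition above) =====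
theorem find_used_character_block_indexes_spec : Claim_equal_find_used_character_block_indexes := by
  intro lol msg _
  unfold Spec_find_used_character_block_indexes find_used_character_block_indexes find_used_character_block_indexes_alt
  set bset := msg.foldl (fun s c =>
      match (pvFirstDict lol 0 PySem.Dict.empty).get? c with
      | some j => PySem.Set.add s j
      | none => s) PySem.Set.empty with hbset
  have hA : (pvALoop lol 0 (PySem.Set.ofList msg) []).Pairwise (· < ·) :=
    pvASorted lol 0 _ [] List.Pairwise.nil (by simp)
  have hmem : ∀ i, i ∈ pvALoop lol 0 (PySem.Set.ofList msg) [] ↔ i ∈ bset := by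
    intro i
    rw [pvAMem, hbset, pvBMem]
    simp only [List.not_mem_nil, false_or, PySem.Set.empty]
    constructor
    · rintro ⟨c, hc, hf⟩
      refine ⟨c, ?_, ?_⟩
      · have := List.mem_of_elem_eq_true hc
        rwa [PySem.Set.mem_ofList] at this
      · rw [pvDictSpec]
        simpa [PySem.Dict.get?_empty] using hf
    · rintro ⟨c, hc, hf⟩
      rw [pvDictSpec] at hf
      simp only [PySem.Dict.get?_empty] at hf
      exact ⟨c, by
        rw [List.contains_eq_mem, decide_eq_true_eq, PySem.Set.mem_ofList]
        exact hc, hf⟩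
  have hperm : (pvALoop lol 0 (PySem.Set.ofList msg) []).Perm bset := by
    refine (List.perm_ext_iff_of_nodup hA.nodup ?_).mpr hmem
    exact pvBNodup _ msg _ List.nodup_nil
  exact (PySem.List.sorted_eq_of_perm_of_pairwise_lt _ _ _ hperm hA).symm
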